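-- pv_equiv track=rewrite | github.com/albanac808/taxonomic-classifier | search_animals.py | organize_results
-- ===== SOURCE A (Python) =====
-- def organize_results(search_results):
--     categorized = {
--         "MAMMALS": set(),
--         "FISH": set(),
--         "BIRDS": set(),
--         "REPTILES": set(),
--         "SNAKES": set(),
--         "PLANTS": set(),
--         "OTHER": set()
--     }
--
--     for result in search_results:
--         if any(word in result.lower() for word in ["wolf", "canid"]):
--             categorized["MAMMALS"].add(result)
--         elif any(word in result.lower() for word in ["fish", "eel"]):
--             categorized["FISH"].add(result)
--         elif "snake" in result.lower():
--             categorized["SNAKES"].add(result)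
--         elif any(word in result.lower() for word in ["berry", "willow", "grass"]):
--             categorized["PLANTS"].add(result)
--         else:
--             categorized["OTHER"].add(result)
--
--     return categorized
-- ===== SOURCE B (Python) =====
-- # Staged sieve: instead of classifying each result in one pass through an if/elif
-- # chain, B makes one filtering pass per category over a shrinking 'remaining' list
-- # (partition-by-stages), building each category's whole set at once.
-- def _matches(text, kws):
--     low = text.lower()
--     return any(w in low for w in kws)
--
-- def organize_results(search_results):
--     categorized = {}
--     remaining = list(search_results)
--     for name, kws in [("MAMMALS", ["wolf", "canid"]),
--                       ("FISH", ["fish", "eel"]),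
--                       ("BIRDS", []),
--                       ("REPTILES", []),
--                       ("SNAKES", ["snake"]),
--                       ("PLANTS", ["berry", "willow", "grass"])]:
--         categorized[name] = set(r for r in remaining if _matches(r, kws))
--         remaining = [r for r in remaining if not _matches(r, kws)]
--     categorized["OTHER"] = set(remaining)
--     return categorized
-- ===== Notes on version B (the rewrite author's own statement) =====
-- stated objective: alternative
-- what changed: Replaces A's single per-item pass through an if/elif chain (adding each result to one set) with a staged sieve: one filtering pass per category over a shrinking 'remaining' list, building each category's whole set at once and leaving the leftovers as OTHER.
import Mathlib
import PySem

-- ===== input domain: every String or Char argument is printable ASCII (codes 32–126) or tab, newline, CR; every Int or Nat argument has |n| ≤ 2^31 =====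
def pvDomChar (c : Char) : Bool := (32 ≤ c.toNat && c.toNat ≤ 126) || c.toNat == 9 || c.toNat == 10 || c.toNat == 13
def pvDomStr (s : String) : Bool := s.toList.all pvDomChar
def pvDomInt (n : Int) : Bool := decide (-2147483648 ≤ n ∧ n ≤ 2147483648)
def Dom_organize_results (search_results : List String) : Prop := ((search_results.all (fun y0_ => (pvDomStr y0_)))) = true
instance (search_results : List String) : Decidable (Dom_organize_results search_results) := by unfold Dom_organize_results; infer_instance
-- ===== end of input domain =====

-- B replaces A's per-item if/elif classification pass with a staged sieve: one filtering
-- pass per category over a shrinking 'remaining' list, building each category's set at once.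


-- ===== PORT A =====
def organize_results (search_results : List String) : List (String × List String) :=
  let categorized : PySem.Dict String (PySem.Set String) := PySem.Dict.ofList
    [("MAMMALS", PySem.Set.empty), ("FISH", PySem.Set.empty), ("BIRDS", PySem.Set.empty),
     ("REPTILES", PySem.Set.empty), ("SNAKES", PySem.Set.empty), ("PLANTS", PySem.Set.empty),
     ("OTHER", PySem.Set.empty)]
  let categorized := search_results.foldl (fun d result =>
    if ["wolf", "canid"].any (fun word => PySem.Str.isIn word (PySem.Str.lower result)) then
      d.modify "MAMMALS" PySem.Set.empty (fun s => PySem.Set.add s result)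
    else if ["fish", "eel"].any (fun word => PySem.Str.isIn word (PySem.Str.lower result)) then
      d.modify "FISH" PySem.Set.empty (fun s => PySem.Set.add s result)
    else if PySem.Str.isIn "snake" (PySem.Str.lower result) then
      d.modify "SNAKES" PySem.Set.empty (fun s => PySem.Set.add s result)
    else if ["berry", "willow", "grass"].any (fun word => PySem.Str.isIn word (PySem.Str.lower result)) then
      d.modify "PLANTS" PySem.Set.empty (fun s => PySem.Set.add s result)
    else
      d.modify "OTHER" PySem.Set.empty (fun s => PySem.Set.add s result)) categorized
  categorized.items

-- ===== PORT B =====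
-- _matches(text, kws): low = text.lower(); any(w in low for w in kws)
def pvMatches (text : String) (kws : List String) : Bool :=
  let low := PySem.Str.lower text
  kws.any (fun w => PySem.Str.isIn w low)

-- the (name, keywords) rows Source B's sieve loop iterates over
def pvTableB : List (String × List String) :=
  [("MAMMALS", ["wolf", "canid"]), ("FISH", ["fish", "eel"]), ("BIRDS", []),
   ("REPTILES", []), ("SNAKES", ["snake"]), ("PLANTS", ["berry", "willow", "grass"])]

def organize_results_alt (search_results : List String) : List (String × List String) :=
  let st := pvTableB.foldl
    (fun (st : PySem.Dict String (PySem.Set String) × List String) row =>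
      (st.1.insert row.1 (PySem.Set.ofList (st.2.filter (fun r => pvMatches r row.2))),
       st.2.filter (fun r => !pvMatches r row.2)))
    (PySem.Dict.empty, search_results)
  (st.1.insert "OTHER" (PySem.Set.ofList st.2)).items

-- ===== PRECONDITION & SPEC =====
def Spec_organize_results (search_results : List String) (out : List (String × List String)) : Prop := out = organize_results_alt search_results
instance (search_results : List String) (out : List (String × List String)) : Decidable (Spec_organize_results search_results out) := by unfold Spec_organize_results; infer_instance

-- ===== CLAIM (what is proved, stated in full; the proofs are below) =====
def Claim_equal_organize_results : Prop := ∀ (search_results : List String), Dom_organize_results search_results → Spec_organize_results search_results (organize_results search_results)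

-- ===== LEMMAS AND PROOFS =====

-- the four keyword tests, each computed on the lowercased string (shared by both ports)
def pvC1 (r : String) : Bool := ["wolf", "canid"].any (fun w => PySem.Str.isIn w (PySem.Str.lower r))
def pvC2 (r : String) : Bool := ["fish", "eel"].any (fun w => PySem.Str.isIn w (PySem.Str.lower r))
def pvC3 (r : String) : Bool := PySem.Str.isIn "snake" (PySem.Str.lower r)
def pvC4 (r : String) : Bool := ["berry", "willow", "grass"].any (fun w => PySem.Str.isIn w (PySem.Str.lower r))

-- first-match predicates
def pvP1 (r : String) : Bool := pvC1 r
def pvP2 (r : String) : Bool := !pvC1 r && pvC2 r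
def pvP3 (r : String) : Bool := !pvC1 r && !pvC2 r && pvC3 r
def pvP4 (r : String) : Bool := !pvC1 r && !pvC2 r && !pvC3 r && pvC4 r
def pvP5 (r : String) : Bool := !pvC1 r && !pvC2 r && !pvC3 r && !pvC4 r

-- the seven-key dict with given category sets
def pvMk7 (M F B R S P O : PySem.Set String) : PySem.Dict String (PySem.Set String) :=
  PySem.Dict.mk [("MAMMALS", M), ("FISH", F), ("BIRDS", B), ("REPTILES", R),
                 ("SNAKES", S), ("PLANTS", P), ("OTHER", O)]

-- A's loop body sends pvMk7 to pvMk7, touching exactly the first-matching category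
lemma pv_stepA (M F B R S P O : PySem.Set String) (result : String) :
    (if ["wolf", "canid"].any (fun word => PySem.Str.isIn word (PySem.Str.lower result)) then
      (pvMk7 M F B R S P O).modify "MAMMALS" PySem.Set.empty (fun s => PySem.Set.add s result)
    else if ["fish", "eel"].any (fun word => PySem.Str.isIn word (PySem.Str.lower result)) then
      (pvMk7 M F B R S P O).modify "FISH" PySem.Set.empty (fun s => PySem.Set.add s result)
    else if PySem.Str.isIn "snake" (PySem.Str.lower result) then
      (pvMk7 M F B R S P O).modify "SNAKES" PySem.Set.empty (fun s => PySem.Set.add s result)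
    else if ["berry", "willow", "grass"].any (fun word => PySem.Str.isIn word (PySem.Str.lower result)) then
      (pvMk7 M F B R S P O).modify "PLANTS" PySem.Set.empty (fun s => PySem.Set.add s result)
    else
      (pvMk7 M F B R S P O).modify "OTHER" PySem.Set.empty (fun s => PySem.Set.add s result)) =
    pvMk7 (if pvP1 result then M.add result else M) (if pvP2 result then F.add result else F)
          B R (if pvP3 result then S.add result else S) (if pvP4 result then P.add result else P)
          (if pvP5 result then O.add result else O) := by
  simp only [pvMk7, PySem.Dict.modify, PySem.Dict.insert, PySem.Dict.getD, PySem.Dict.get?,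
    PySem.Dict.contains, pvP1, pvP2, pvP3, pvP4, pvP5, pvC1, pvC2, pvC3, pvC4]
  split_ifs <;> simp_all

-- A's fold decomposes into seven independent conditional folds
lemma pv_foldA (xs : List String) (M F B R S P O : PySem.Set String) :
    xs.foldl (fun d result =>
      if ["wolf", "canid"].any (fun word => PySem.Str.isIn word (PySem.Str.lower result)) then
        d.modify "MAMMALS" PySem.Set.empty (fun s => PySem.Set.add s result)
      else if ["fish", "eel"].any (fun word => PySem.Str.isIn word (PySem.Str.lower result)) then
        d.modify "FISH" PySem.Set.empty (fun s => PySem.Set.add s result)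
      else if PySem.Str.isIn "snake" (PySem.Str.lower result) then
        d.modify "SNAKES" PySem.Set.empty (fun s => PySem.Set.add s result)
      else if ["berry", "willow", "grass"].any (fun word => PySem.Str.isIn word (PySem.Str.lower result)) then
        d.modify "PLANTS" PySem.Set.empty (fun s => PySem.Set.add s result)
      else
        d.modify "OTHER" PySem.Set.empty (fun s => PySem.Set.add s result)) (pvMk7 M F B R S P O) =
    pvMk7 (xs.foldl (fun s r => if pvP1 r then s.add r else s) M)
          (xs.foldl (fun s r => if pvP2 r then s.add r else s) F) B R
          (xs.foldl (fun s r => if pvP3 r then s.add r else s) S)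
          (xs.foldl (fun s r => if pvP4 r then s.add r else s) P)
          (xs.foldl (fun s r => if pvP5 r then s.add r else s) O) := by
  induction xs generalizing M F B R S P O with
  | nil => rfl
  | cons x xs ih => simp only [List.foldl_cons, pv_stepA, ih]

-- a conditional fold of Set.add is Set.add folded over the filtered list
lemma pv_foldl_addIf (p : String → Bool) (xs : List String) (acc : PySem.Set String) :
    xs.foldl (fun s r => if p r then s.add r else s) acc = (xs.filter p).foldl PySem.Set.add acc := by
  induction xs generalizing acc with
  | nil => rfl
  | cons x xs ih =>
    simp only [List.foldl_cons, List.filter_cons]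
    by_cases h : p x <;> simp [h, ih]

lemma pv_ofList_filter (p : String → Bool) (xs : List String) :
    xs.foldl (fun s r => if p r then s.add r else s) PySem.Set.empty = PySem.Set.ofList (xs.filter p) := by
  rw [pv_foldl_addIf]; rfl

-- B's flattened sieve predicates are exactly the first-match predicates
lemma pv_fP1 : (fun r => ["wolf", "canid"].any fun w => PySem.Str.isIn w (PySem.Str.lower r)) = pvP1 := by
  funext a; simp only [pvP1, pvC1]

lemma pv_fP2 : (fun a => (["fish", "eel"].any fun w => PySem.Str.isIn w (PySem.Str.lower a)) &&
    ! ["wolf", "canid"].any fun w => PySem.Str.isIn w (PySem.Str.lower a)) = pvP2 := by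
  funext a; simp only [pvP2, pvC1, pvC2]
  cases (["wolf", "canid"].any fun w => PySem.Str.isIn w (PySem.Str.lower a)) <;> simp

lemma pv_fP3 : (fun a => (["snake"].any fun w => PySem.Str.isIn w (PySem.Str.lower a)) &&
    ((! ["fish", "eel"].any fun w => PySem.Str.isIn w (PySem.Str.lower a)) &&
      ! ["wolf", "canid"].any fun w => PySem.Str.isIn w (PySem.Str.lower a))) = pvP3 := by
  funext a; simp only [pvP3, pvC1, pvC2, pvC3, List.any_cons, List.any_nil, Bool.or_false]
  cases (PySem.Str.isIn "wolf" (PySem.Str.lower a) || PySem.Str.isIn "canid" (PySem.Str.lower a)) <;>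
    cases (PySem.Str.isIn "fish" (PySem.Str.lower a) || PySem.Str.isIn "eel" (PySem.Str.lower a)) <;> simp

lemma pv_fP4 : (fun a => (["berry", "willow", "grass"].any fun w => PySem.Str.isIn w (PySem.Str.lower a)) &&
    ((! ["snake"].any fun w => PySem.Str.isIn w (PySem.Str.lower a)) &&
      ((! ["fish", "eel"].any fun w => PySem.Str.isIn w (PySem.Str.lower a)) &&
        ! ["wolf", "canid"].any fun w => PySem.Str.isIn w (PySem.Str.lower a)))) = pvP4 := by
  funext a; simp only [pvP4, pvC1, pvC2, pvC3, pvC4, List.any_cons, List.any_nil, Bool.or_false]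
  cases (PySem.Str.isIn "wolf" (PySem.Str.lower a) || PySem.Str.isIn "canid" (PySem.Str.lower a)) <;>
    cases (PySem.Str.isIn "fish" (PySem.Str.lower a) || PySem.Str.isIn "eel" (PySem.Str.lower a)) <;>
      cases (PySem.Str.isIn "snake" (PySem.Str.lower a)) <;> simp

lemma pv_fP5 : (fun a => (! ["berry", "willow", "grass"].any fun w => PySem.Str.isIn w (PySem.Str.lower a)) &&
    ((! ["snake"].any fun w => PySem.Str.isIn w (PySem.Str.lower a)) &&
      ((! ["fish", "eel"].any fun w => PySem.Str.isIn w (PySem.Str.lower a)) &&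
        ! ["wolf", "canid"].any fun w => PySem.Str.isIn w (PySem.Str.lower a)))) = pvP5 := by
  funext a; simp only [pvP5, pvC1, pvC2, pvC3, pvC4, List.any_cons, List.any_nil, Bool.or_false]
  cases (PySem.Str.isIn "wolf" (PySem.Str.lower a) || PySem.Str.isIn "canid" (PySem.Str.lower a)) <;>
    cases (PySem.Str.isIn "fish" (PySem.Str.lower a) || PySem.Str.isIn "eel" (PySem.Str.lower a)) <;>
      cases (PySem.Str.isIn "snake" (PySem.Str.lower a)) <;> simp

lemma pv_init : PySem.Dict.ofList
    ([("MAMMALS", PySem.Set.empty), ("FISH", PySem.Set.empty), ("BIRDS", PySem.Set.empty),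
      ("REPTILES", PySem.Set.empty), ("SNAKES", PySem.Set.empty), ("PLANTS", PySem.Set.empty),
      ("OTHER", PySem.Set.empty)] : List (String × PySem.Set String)) =
    pvMk7 PySem.Set.empty PySem.Set.empty PySem.Set.empty PySem.Set.empty PySem.Set.empty
      PySem.Set.empty PySem.Set.empty := by rfl

-- ===== VERDICT (by name: the statement is the Claim_ definition above) =====
theorem organize_results_spec : Claim_equal_organize_results := by
  intro xs _
  show organize_results xs = organize_results_alt xs
  unfold organize_results organize_results_alt
  simp only [pv_init, pv_foldA, pv_ofList_filter]
  simp only [pvTableB, List.foldl_cons, List.foldl_nil, List.filter_filter]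
  simp only [pvMatches, List.any_nil, Bool.false_and, Bool.not_false, Bool.true_and]
  simp only [pv_fP1, pv_fP2, pv_fP3, pv_fP4, pv_fP5, List.filter_false]
  simp [pvMk7, PySem.Dict.insert, PySem.Dict.contains, PySem.Dict.empty]
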